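-- pv_equiv track=rewrite | github.com/JadyLiu/code-assistant | app.py | extract_agent_from_text
-- ===== SOURCE A (Python) =====
-- def extract_agent_from_text(text: str) -> str:
--     agents = ["code_explainer", "code_generator", "github_agent"]
--     for line in reversed(text.strip().splitlines()):
--         line_clean = line.strip().lower()
--         for agent in agents:
--             if agent in line_clean:
--                 return agent
--     raise ValueError("No agent decision found in supervisor output.")
-- ===== SOURCE B (Python) =====
-- def extract_agent_from_text(text: str) -> str:
--     lines = [l.strip().lower() for l in text.strip().splitlines()]
--     best = -1
--     result = None
--     for agent in ["code_explainer", "code_generator", "github_agent"]: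
--         last = -1
--         for i, line in enumerate(lines):
--             if agent in line:
--                 last = i
--         if last > best:
--             best = last
--             result = agent
--     if result is None:
--         raise ValueError("No agent decision found in supervisor output.")
--     return result
-- ===== Notes on version B (the rewrite author's own statement) =====
-- stated objective: alternative
-- what changed: B inverts the loop nesting: for each agent it computes the last line index containing that agent, then returns the agent with the greatest such index (agent priority order breaks ties on the same line), instead of A's reverse line scan with per-line agent check and early return.
import Mathlib
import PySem

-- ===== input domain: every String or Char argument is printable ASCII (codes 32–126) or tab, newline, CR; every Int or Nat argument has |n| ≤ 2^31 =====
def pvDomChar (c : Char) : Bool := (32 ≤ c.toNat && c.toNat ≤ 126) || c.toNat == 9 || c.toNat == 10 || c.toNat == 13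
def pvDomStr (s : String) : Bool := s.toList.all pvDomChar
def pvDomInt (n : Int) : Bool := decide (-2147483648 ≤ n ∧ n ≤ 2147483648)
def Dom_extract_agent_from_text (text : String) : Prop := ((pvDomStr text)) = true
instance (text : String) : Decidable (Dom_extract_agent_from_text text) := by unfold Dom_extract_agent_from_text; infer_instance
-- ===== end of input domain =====

-- B inverts the loop nesting: per-agent last matching line index, then argmax with
-- priority tie-break, instead of A's reverse line scan (objective: alternative, same cost).


-- ===== PORT A =====
def pvAgents : List String := ["code_explainer", "code_generator", "github_agent"]

-- inner 'for agent in agents: if agent in line_clean: return agent'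
def pvFindAgent : List String → String → Option String
  | [], _ => none
  | a :: rest, lc => if PySem.Str.isIn a lc then some a else pvFindAgent rest lc

-- outer 'for line in reversed(...)' with early return
def pvALoop : List String → Option String
  | [] => none
  | line :: rest =>
    match pvFindAgent pvAgents (PySem.Str.lower (PySem.Str.strip line)) with
    | some a => some a
    | none => pvALoop rest

def extract_agent_from_text (text : String) : String :=
  match pvALoop (PySem.Str.splitlines (PySem.Str.strip text)).reverse with
  | some a => a
  | none => ""  -- Python raises ValueError here; excluded by Pre_

-- ===== PORT B =====
def pvAgentsB : List String := ["code_explainer", "code_generator", "github_agent"]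

-- 'last = -1; for i, line in enumerate(lines): if agent in line: last = i'
def pvLastIndex (agent : String) : List String → Int → Int → Int
  | [], _, last => last
  | l :: rest, i, last => pvLastIndex agent rest (i + 1) (if PySem.Str.isIn agent l then i else last)

-- 'for agent in [...]: last = ...; if last > best: best, result = last, agent'
def pvBLoop : List String → List String → Int → Option String → Option String
  | [], _, _, result => result
  | a :: rest, lines, best, result =>
    let last := pvLastIndex a lines 0 (-1)
    if last > best then pvBLoop rest lines last (some a)
    else pvBLoop rest lines best result

def extract_agent_from_text_alt (text : String) : String :=
  match pvBLoop pvAgentsB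
      ((PySem.Str.splitlines (PySem.Str.strip text)).map
        (fun l => PySem.Str.lower (PySem.Str.strip l))) (-1) none with
  | some a => a
  | none => ""  -- Source B raises ValueError here; excluded by Pre_

-- ===== PRECONDITION & SPEC =====
-- Pre_ holds exactly when some line contains an agent name; otherwise Python A raises ValueError.
def Pre_extract_agent_from_text (text : String) : Prop :=
  (PySem.Str.splitlines (PySem.Str.strip text)).any
    (fun line => pvAgents.any
      (fun a => PySem.Str.isIn a (PySem.Str.lower (PySem.Str.strip line)))) = true
instance (text : String) : Decidable (Pre_extract_agent_from_text text) := by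
  unfold Pre_extract_agent_from_text; infer_instance

def pvWitness_extract_agent_from_text : String := "choose: github_agent"

def Spec_extract_agent_from_text (text : String) (out : String) : Prop := out = extract_agent_from_text_alt text
instance (text : String) (out : String) : Decidable (Spec_extract_agent_from_text text out) := by unfold Spec_extract_agent_from_text; infer_instance

-- ===== CLAIM (what is proved, stated in full; the proofs are below) =====
def Claim_equal_extract_agent_from_text : Prop := ∀ (text : String), Dom_extract_agent_from_text text → Pre_extract_agent_from_text text → Spec_extract_agent_from_text text (extract_agent_from_text text)

-- ===== LEMMAS AND PROOFS =====

-- B's inner loop result is either the initial value or an index in [i, i + |xs|).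
theorem pvLastIndex_cases (a : String) (xs : List String) (i last : Int) :
    pvLastIndex a xs i last = last ∨
      (i ≤ pvLastIndex a xs i last ∧ pvLastIndex a xs i last < i + xs.length) := by
  induction xs generalizing i last with
  | nil => left; rfl
  | cons x xs ih =>
    simp only [pvLastIndex, List.length_cons]
    rcases ih (i + 1) (if PySem.Str.isIn a x then i else last) with h | ⟨h1, h2⟩
    · rw [h]; split_ifs with hx
      · right; constructor <;> omega
      · left; rfl
    · right; constructor <;> omega

-- Appending one line: its index i + |xs| wins if the agent occurs in it.
theorem pvLastIndex_append (a l : String) (xs : List String) (i last : Int) :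
    pvLastIndex a (xs ++ [l]) i last =
      if PySem.Str.isIn a l then i + xs.length else pvLastIndex a xs i last := by
  induction xs generalizing i last with
  | nil => simp [pvLastIndex]
  | cons x xs ih =>
    simp only [List.cons_append, pvLastIndex, ih, List.length_cons]
    split_ifs <;> first | rfl | omega

-- Main lemma: B's agent-major argmax equals A's reverse line scan.
set_option maxHeartbeats 1000000 in
theorem pvB_eq_pvA (raw : List String) :
    pvBLoop pvAgentsB (raw.map (fun l => PySem.Str.lower (PySem.Str.strip l))) (-1) none =
      pvALoop raw.reverse := by
  induction raw using List.reverseRecOn with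
  | nil => rfl
  | append_singleton xs l ih =>
    have hmap : (xs ++ [l]).map (fun l => PySem.Str.lower (PySem.Str.strip l)) =
        xs.map (fun l => PySem.Str.lower (PySem.Str.strip l)) ++
          [PySem.Str.lower (PySem.Str.strip l)] := by simp
    have hrev : (xs ++ [l]).reverse = l :: xs.reverse := by simp
    rw [hmap, hrev]
    simp only [pvBLoop, pvAgentsB, pvAgents, pvLastIndex_append, pvALoop, pvFindAgent]
    simp only [pvBLoop, pvAgentsB] at ih
    set nl := PySem.Str.lower (PySem.Str.strip l) with hnl
    set m := xs.map (fun l => PySem.Str.lower (PySem.Str.strip l)) with hm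
    by_cases e1 : PySem.Str.isIn "code_explainer" nl <;>
      by_cases e2 : PySem.Str.isIn "code_generator" nl <;>
      by_cases e3 : PySem.Str.isIn "github_agent" nl <;>
      simp only [e1, e2, e3, if_true, if_false, Bool.false_eq_true] <;>
      [skip; skip; skip; skip; skip; skip; skip; exact ih] <;>
      rcases pvLastIndex_cases "code_explainer" m 0 (-1) with h1 | ⟨h1a, h1b⟩ <;>
      rcases pvLastIndex_cases "code_generator" m 0 (-1) with h2 | ⟨h2a, h2b⟩ <;>
      rcases pvLastIndex_cases "github_agent" m 0 (-1) with h3 | ⟨h3a, h3b⟩ <;>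
      split_ifs <;> first | rfl | omega

-- ===== VERDICT (by name: the statement is the Claim_ definition above) =====
theorem extract_agent_from_text_spec : Claim_equal_extract_agent_from_text := by
  intro text _ _
  unfold Spec_extract_agent_from_text extract_agent_from_text extract_agent_from_text_alt
  rw [pvB_eq_pvA]
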